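-- pv_equiv track=rewrite | github.com/ndnstyl/theInnovativeNative | scripts/shared/timeline_to_premiere_xml.py | categorize_sfx
-- ===== SOURCE A (Python) =====
-- def categorize_sfx(sfx_clips):
--     """Split SFX into sub-categories for multi-track routing.
--
--     Returns dict: { category_name: [clips...] }
--     Categories based on SFX source filename patterns:
--       - bass/hum: sub_bass_hum, data_stream_hum, elevator_hum
--       - ambient: distant_traffic, building_hallway, wind_chainlink
--       - impact: door_slam, police_siren_distant
--       - detail: keyboard_typing, notification_ping
--     """
--     categories = {
--         "sfx-bass": [],       # A2: low-end rumbles and hums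
--         "sfx-ambient": [],    # A3: ambient beds and atmosphere
--         "sfx-impact": [],     # A4: impacts, slams, punctuation
--         "sfx-detail": [],     # A5: detail SFX (typing, pings)
--     }
--
--     for clip in sfx_clips:
--         source = clip.get("source", "").lower()
--         sfx_id = clip.get("id", "").lower()
--
--         if any(k in source for k in ["bass", "hum", "data_stream"]):
--             categories["sfx-bass"].append(clip)
--         elif any(k in source for k in ["traffic", "hallway", "wind", "chainlink"]):
--             categories["sfx-ambient"].append(clip)
--         elif any(k in source for k in ["slam", "siren", "door", "police"]):
--             categories["sfx-impact"].append(clip)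
--         else:
--             categories["sfx-detail"].append(clip)
--
--     return categories
-- ===== SOURCE B (Python) =====
-- _SFX_TABLE = [
--     ("sfx-bass", ["bass", "hum", "data_stream"]),
--     ("sfx-ambient", ["traffic", "hallway", "wind", "chainlink"]),
--     ("sfx-impact", ["slam", "siren", "door", "police"]),
-- ]
--
--
-- def _pick_category(clip):
--     """First matching category for a clip's lowercased source, else detail."""
--     source = clip.get("source", "").lower()
--     for name, keywords in _SFX_TABLE:
--         if any(k in source for k in keywords):
--             return name
--     return "sfx-detail"
--
--
-- def categorize_sfx(sfx_clips):
--     """Group SFX clips per category by filtering once per category."""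
--     return {
--         name: [clip for clip in sfx_clips if _pick_category(clip) == name]
--         for name in ["sfx-bass", "sfx-ambient", "sfx-impact", "sfx-detail"]
--     }
-- ===== Notes on version B (the rewrite author's own statement) =====
-- stated objective: simpler
-- what changed: Replaces A's single pass with a four-way if/elif chain appending into a pre-built dict by a keyword table, a first-match category picker, and one filter of the clip list per category.
import Mathlib
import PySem

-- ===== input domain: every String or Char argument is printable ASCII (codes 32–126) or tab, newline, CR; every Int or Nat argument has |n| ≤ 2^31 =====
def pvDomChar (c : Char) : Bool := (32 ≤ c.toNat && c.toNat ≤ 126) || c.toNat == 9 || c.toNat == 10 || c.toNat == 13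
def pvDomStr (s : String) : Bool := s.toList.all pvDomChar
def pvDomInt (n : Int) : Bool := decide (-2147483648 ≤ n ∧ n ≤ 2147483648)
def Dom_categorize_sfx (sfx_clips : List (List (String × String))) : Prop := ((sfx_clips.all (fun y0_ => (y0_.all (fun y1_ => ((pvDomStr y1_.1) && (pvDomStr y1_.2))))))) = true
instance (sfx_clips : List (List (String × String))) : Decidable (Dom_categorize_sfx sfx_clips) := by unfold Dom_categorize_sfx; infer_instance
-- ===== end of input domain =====

-- B replaces A's single pass with an if/elif chain by a keyword table and one filter per category; objective: simpler.

-- ===== PORT A =====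
-- A: init dict of the 4 categories, one pass over the clips, if/elif chain appending into the dict.
def categorize_sfx (sfx_clips : List (List (String × String))) : List (String × List (List (String × String))) :=
  let categories : PySem.Dict String (List (List (String × String))) :=
    ((((PySem.Dict.empty).insert "sfx-bass" []).insert "sfx-ambient" []).insert "sfx-impact" []).insert "sfx-detail" []
  (sfx_clips.foldl (fun cats clip =>
    let source := PySem.Str.lower ((PySem.Dict.mk clip).getD "source" "")
    let _sfx_id := PySem.Str.lower ((PySem.Dict.mk clip).getD "id" "")
    if (["bass", "hum", "data_stream"]).any (fun k => PySem.Str.isIn k source) then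
      cats.modify "sfx-bass" [] (fun l => l ++ [clip])
    else if (["traffic", "hallway", "wind", "chainlink"]).any (fun k => PySem.Str.isIn k source) then
      cats.modify "sfx-ambient" [] (fun l => l ++ [clip])
    else if (["slam", "siren", "door", "police"]).any (fun k => PySem.Str.isIn k source) then
      cats.modify "sfx-impact" [] (fun l => l ++ [clip])
    else
      cats.modify "sfx-detail" [] (fun l => l ++ [clip])) categories).items

-- ===== PORT B =====
-- B: ordered keyword table, a picker returning the first matching category, one filter per category.
def pvSfxTable : List (String × List String) :=
  [("sfx-bass", ["bass", "hum", "data_stream"]),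
   ("sfx-ambient", ["traffic", "hallway", "wind", "chainlink"]),
   ("sfx-impact", ["slam", "siren", "door", "police"])]

def pvPickFrom (source : String) : List (String × List String) → String
  | [] => "sfx-detail"
  | (name, keywords) :: rest =>
      if keywords.any (fun k => PySem.Str.isIn k source) then name
      else pvPickFrom source rest

def pvPickCategory (clip : List (String × String)) : String :=
  pvPickFrom (PySem.Str.lower ((PySem.Dict.mk clip).getD "source" "")) pvSfxTable

def categorize_sfx_alt (sfx_clips : List (List (String × String))) : List (String × List (List (String × String))) :=
  (["sfx-bass", "sfx-ambient", "sfx-impact", "sfx-detail"]).map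
    (fun name => (name, sfx_clips.filter (fun clip => pvPickCategory clip == name)))

-- ===== PRECONDITION & SPEC =====
def Spec_categorize_sfx (sfx_clips : List (List (String × String))) (out : List (String × List (List (String × String)))) : Prop := out = categorize_sfx_alt sfx_clips
instance (sfx_clips : List (List (String × String))) (out : List (String × List (List (String × String)))) : Decidable (Spec_categorize_sfx sfx_clips out) := by unfold Spec_categorize_sfx; infer_instance

-- ===== CLAIM (what is proved, stated in full; the proofs are below) =====
def Claim_equal_categorize_sfx : Prop := ∀ (sfx_clips : List (List (String × String))), Dom_categorize_sfx sfx_clips → Spec_categorize_sfx sfx_clips (categorize_sfx sfx_clips)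

-- ===== LEMMAS AND PROOFS =====
lemma pvPickFrom_cons (s : String) (n : String) (ks : List String) (rest : List (String × List String)) :
    pvPickFrom s ((n, ks) :: rest) = if ks.any (fun k => PySem.Str.isIn k s) then n else pvPickFrom s rest := rfl

lemma pvPickFrom_nil (s : String) : pvPickFrom s [] = "sfx-detail" := rfl

-- Loop invariant: A's fold over the 4-key dict accumulates exactly B's per-category filters.
lemma categorize_loop (l : List (List (String × String)))
    (lb la li ld : List (List (String × String))) :
    (l.foldl (fun cats clip =>
      let source := PySem.Str.lower ((PySem.Dict.mk clip).getD "source" "")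
      let _sfx_id := PySem.Str.lower ((PySem.Dict.mk clip).getD "id" "")
      if (["bass", "hum", "data_stream"]).any (fun k => PySem.Str.isIn k source) then
        cats.modify "sfx-bass" [] (fun l => l ++ [clip])
      else if (["traffic", "hallway", "wind", "chainlink"]).any (fun k => PySem.Str.isIn k source) then
        cats.modify "sfx-ambient" [] (fun l => l ++ [clip])
      else if (["slam", "siren", "door", "police"]).any (fun k => PySem.Str.isIn k source) then
        cats.modify "sfx-impact" [] (fun l => l ++ [clip])
      else
        cats.modify "sfx-detail" [] (fun l => l ++ [clip]))
      (PySem.Dict.mk [("sfx-bass", lb), ("sfx-ambient", la), ("sfx-impact", li), ("sfx-detail", ld)])).items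
    = [("sfx-bass", lb ++ l.filter (fun clip => pvPickCategory clip == "sfx-bass")),
       ("sfx-ambient", la ++ l.filter (fun clip => pvPickCategory clip == "sfx-ambient")),
       ("sfx-impact", li ++ l.filter (fun clip => pvPickCategory clip == "sfx-impact")),
       ("sfx-detail", ld ++ l.filter (fun clip => pvPickCategory clip == "sfx-detail"))] := by
  induction l generalizing lb la li ld with
  | nil => simp
  | cons clip rest ih =>
    simp only [List.foldl_cons]
    by_cases h1 : (["bass", "hum", "data_stream"]).any (fun k => PySem.Str.isIn k (PySem.Str.lower ((PySem.Dict.mk clip).getD "source" ""))) = true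
    · simp only [h1, if_pos]
      rw [show ((PySem.Dict.mk [("sfx-bass", lb), ("sfx-ambient", la), ("sfx-impact", li), ("sfx-detail", ld)]).modify
          "sfx-bass" [] (fun l => l ++ [clip]))
        = PySem.Dict.mk [("sfx-bass", lb ++ [clip]), ("sfx-ambient", la), ("sfx-impact", li), ("sfx-detail", ld)] from by
          simp [PySem.Dict.modify, PySem.Dict.insert, PySem.Dict.getD, PySem.Dict.get?, PySem.Dict.contains]]
      rw [ih]
      have hp : pvPickCategory clip = "sfx-bass" := by
        simp only [pvPickCategory, pvSfxTable, pvPickFrom_cons]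
        rw [if_pos h1]
      simp [hp]
    · by_cases h2 : (["traffic", "hallway", "wind", "chainlink"]).any (fun k => PySem.Str.isIn k (PySem.Str.lower ((PySem.Dict.mk clip).getD "source" ""))) = true
      · simp only [h1, h2, if_pos, if_neg, Bool.false_eq_true, not_false_eq_true]
        rw [show ((PySem.Dict.mk [("sfx-bass", lb), ("sfx-ambient", la), ("sfx-impact", li), ("sfx-detail", ld)]).modify
            "sfx-ambient" [] (fun l => l ++ [clip]))
          = PySem.Dict.mk [("sfx-bass", lb), ("sfx-ambient", la ++ [clip]), ("sfx-impact", li), ("sfx-detail", ld)] from by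
            simp [PySem.Dict.modify, PySem.Dict.insert, PySem.Dict.getD, PySem.Dict.get?, PySem.Dict.contains]]
        rw [ih]
        have hp : pvPickCategory clip = "sfx-ambient" := by
          simp only [pvPickCategory, pvSfxTable, pvPickFrom_cons]
          rw [if_neg h1, if_pos h2]
        simp [hp]
      · by_cases h3 : (["slam", "siren", "door", "police"]).any (fun k => PySem.Str.isIn k (PySem.Str.lower ((PySem.Dict.mk clip).getD "source" ""))) = true
        · simp only [h1, h2, h3, if_pos, if_neg, Bool.false_eq_true, not_false_eq_true]
          rw [show ((PySem.Dict.mk [("sfx-bass", lb), ("sfx-ambient", la), ("sfx-impact", li), ("sfx-detail", ld)]).modify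
              "sfx-impact" [] (fun l => l ++ [clip]))
            = PySem.Dict.mk [("sfx-bass", lb), ("sfx-ambient", la), ("sfx-impact", li ++ [clip]), ("sfx-detail", ld)] from by
              simp [PySem.Dict.modify, PySem.Dict.insert, PySem.Dict.getD, PySem.Dict.get?, PySem.Dict.contains]]
          rw [ih]
          have hp : pvPickCategory clip = "sfx-impact" := by
            simp only [pvPickCategory, pvSfxTable, pvPickFrom_cons]
            rw [if_neg h1, if_neg h2, if_pos h3]
          simp [hp]
        · simp only [h1, h2, h3, if_neg, Bool.false_eq_true, not_false_eq_true]
          rw [show ((PySem.Dict.mk [("sfx-bass", lb), ("sfx-ambient", la), ("sfx-impact", li), ("sfx-detail", ld)]).modify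
              "sfx-detail" [] (fun l => l ++ [clip]))
            = PySem.Dict.mk [("sfx-bass", lb), ("sfx-ambient", la), ("sfx-impact", li), ("sfx-detail", ld ++ [clip])] from by
              simp [PySem.Dict.modify, PySem.Dict.insert, PySem.Dict.getD, PySem.Dict.get?, PySem.Dict.contains]]
          rw [ih]
          have hp : pvPickCategory clip = "sfx-detail" := by
            simp only [pvPickCategory, pvSfxTable, pvPickFrom_cons, pvPickFrom_nil]
            rw [if_neg h1, if_neg h2, if_neg h3]
          simp [hp]

-- ===== VERDICT (by name: the statement is the Claim_ definition above) =====
theorem categorize_sfx_spec : Claim_equal_categorize_sfx := by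
  intro sfx_clips _
  unfold Spec_categorize_sfx categorize_sfx categorize_sfx_alt
  rw [show ((((PySem.Dict.empty).insert "sfx-bass" ([] : List (List (String × String)))).insert "sfx-ambient" []).insert "sfx-impact" []).insert "sfx-detail" []
      = PySem.Dict.mk [("sfx-bass", []), ("sfx-ambient", []), ("sfx-impact", []), ("sfx-detail", [])] from rfl]
  rw [categorize_loop]
  simp
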